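-- pv_equiv track=rewrite | github.com/mobeenyaqub/Codewars | Alphabet Slices.py | solution
-- ===== SOURCE A (Python) =====
-- def solution(s):
--     ans = []
--     initial = s[0]
--     word = initial
--     for i in s[1:]:
--         if ord(initial) + 1 == ord(i):
--             word += i
--             initial = i
--         else:
--             ans.append(word[::-1])
--             word = initial = i
--
--     ans.append(word[::-1])
--
--     return ''.join(ans)
-- ===== SOURCE B (Python) =====
-- def solution(s):
--     runs = []
--     for c in reversed(s):
--         if runs and ord(runs[-1][-1]) == ord(c) + 1:
--             runs[-1].append(c)
--         else:
--             runs.append([c])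
--     return ''.join(''.join(r) for r in reversed(runs))
-- ===== Notes on version B (the rewrite author's own statement) =====
-- stated objective: alternative
-- what changed: B replaces A's left-to-right scan with running initial/word state and per-run [::-1] reversal by a single right-to-left pass that pushes each character onto a stack of runs, so every run comes out already reversed and is joined without any slicing or reversal.
-- crash fix: On the empty string A raises IndexError (it indexes s[0] unconditionally); B returns ''. — e.g. on solution(""): A raises IndexError, B returns ""
import Mathlib
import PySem

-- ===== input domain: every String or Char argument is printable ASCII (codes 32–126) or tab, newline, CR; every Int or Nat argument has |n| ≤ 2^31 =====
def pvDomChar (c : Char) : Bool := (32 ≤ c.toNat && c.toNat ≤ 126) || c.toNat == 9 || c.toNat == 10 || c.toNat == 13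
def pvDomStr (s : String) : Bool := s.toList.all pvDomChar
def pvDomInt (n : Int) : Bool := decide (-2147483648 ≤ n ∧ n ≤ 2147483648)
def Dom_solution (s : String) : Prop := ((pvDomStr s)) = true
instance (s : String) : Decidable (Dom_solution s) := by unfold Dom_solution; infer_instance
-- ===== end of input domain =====

-- B scans the string once right-to-left, growing run stacks so each run comes out
-- already reversed — no per-run slicing/reversal and no running initial/word state
-- (objective: alternative). A raises IndexError on "", so Pre_ excludes the empty
-- string; B returns "" there (see Raises_ block).


-- ===== PORT A =====
-- Literal port of A: state (ans, initial, word); word is the current run as List Char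
-- (word[::-1] = word.reverse, ''.join(ans) = String.join). s[0]/s[1:] become the
-- head/tail of s.toList; the [] branch is where Python raises IndexError (outside Pre_).
def solution (s : String) : String :=
  match s.toList with
  | [] => ""  -- A raises IndexError here (excluded by Pre_solution)
  | c :: rest =>
    let st := rest.foldl
      (fun (st : List String × Char × List Char) (i : Char) =>
        let (ans, initial, word) := st
        if initial.toNat + 1 = i.toNat then (ans, i, word ++ [i])
        else (ans ++ [String.ofList word.reverse], i, [i]))
      ([], c, [c])
    String.join (st.1 ++ [String.ofList st.2.2.reverse])

-- ===== PORT B =====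
-- Literal port of Source B: one left fold over reversed(s); the Python list-of-lists stack
-- (append at the end, inspect runs[-1][-1]) is transcribed as a cons stack (push at the
-- head, inspect the head's head), so each Python list appears here in reversed order;
-- the final ''.join over reversed(runs) therefore reverses each run back when joining.
def solution_alt (s : String) : String :=
  let runs := s.toList.reverse.foldl
    (fun (runs : List (List Char)) (c : Char) =>
      match runs with
      | (d :: r) :: rest =>
        if d.toNat = c.toNat + 1 then (c :: d :: r) :: rest else [c] :: (d :: r) :: rest
      | _ => [c] :: runs)
    []
  String.ofList (runs.map List.reverse).flatten

-- ===== PRECONDITION & SPEC =====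
-- A indexes s[0] unconditionally, so it raises IndexError exactly on the empty string.
def Pre_solution (s : String) : Prop := s ≠ ""
instance (s : String) : Decidable (Pre_solution s) := by unfold Pre_solution; infer_instance
def pvWitness_solution : String := "abcxy"

-- On the empty string A raises IndexError; B returns "".
def Raises_solution (s : String) : Prop := s = ""
instance (s : String) : Decidable (Raises_solution s) := by unfold Raises_solution; infer_instance
def pvRaiseWitness_solution : String := ""
def pvRaiseWitnessOut_solution : String := ""

def Spec_solution (s : String) (out : String) : Prop := out = solution_alt s
instance (s : String) (out : String) : Decidable (Spec_solution s out) := by unfold Spec_solution; infer_instance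

-- ===== CLAIM (what is proved, stated in full; the proofs are below) =====
def Claim_equal_solution : Prop := ∀ (s : String), Dom_solution s → Pre_solution s → Spec_solution s (solution s)
def Claim_raises_solution : Prop := (∀ (s : String), Dom_solution s → Raises_solution s → ¬ Pre_solution s) ∧ (Dom_solution (pvRaiseWitness_solution) ∧ Raises_solution (pvRaiseWitness_solution) ∧ solution_alt (pvRaiseWitness_solution) = pvRaiseWitnessOut_solution)

-- ===== LEMMAS AND PROOFS =====

-- The maximal-increasing-run decomposition, as structural recursion from the left.
def runsR : List Char → List (List Char)
  | [] => []
  | c :: cs =>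
    match runsR cs with
    | (d :: r) :: rest =>
      if d.toNat = c.toNat + 1 then (c :: d :: r) :: rest else [c] :: (d :: r) :: rest
    | _ => [c] :: runsR cs

-- Recursive characterization of A's loop body.
def chop (init : Char) (word : List Char) : List Char → List String
  | [] => [String.ofList word.reverse]
  | i :: rest =>
    if init.toNat + 1 = i.toNat then chop i (word ++ [i]) rest
    else String.ofList word.reverse :: chop i [i] rest

lemma runsR_cons (c : Char) (cs : List Char) :
    ∃ run rest, runsR (c :: cs) = (c :: run) :: rest := by
  simp only [runsR]
  rcases h : runsR cs with _ | ⟨_ | ⟨d, r⟩, rest⟩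
  · exact ⟨[], _, rfl⟩
  · exact ⟨[], _, rfl⟩
  · by_cases hd : d.toNat = c.toNat + 1 <;> simp [hd]

lemma A_fold_eq_chop (l : List Char) (ans : List String) (init : Char) (word : List Char) :
    (let st := l.foldl
      (fun (st : List String × Char × List Char) (i : Char) =>
        let (ans, initial, word) := st
        if initial.toNat + 1 = i.toNat then (ans, i, word ++ [i])
        else (ans ++ [String.ofList word.reverse], i, [i]))
      (ans, init, word)
     st.1 ++ [String.ofList st.2.2.reverse]) = ans ++ chop init word l := by
  induction l generalizing ans init word with
  | nil => simp [chop]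
  | cons i rest ih =>
    simp only [List.foldl_cons, chop]
    by_cases h : init.toNat + 1 = i.toNat
    · simp [h, ih]
    · simp [h, ih]

lemma chop_eq_runsR (rest : List Char) (init : Char) (word : List Char) :
    ∀ run rs, runsR (init :: rest) = (init :: run) :: rs →
      chop init word rest = String.ofList (word ++ run).reverse :: rs.map (fun r => String.ofList r.reverse) := by
  induction rest generalizing init word with
  | nil =>
    intro run rs h
    simp [runsR] at h
    obtain ⟨h1, h2⟩ := h
    subst h1; subst h2
    simp [chop]
  | cons i rs' ih =>
    intro run rsx h
    obtain ⟨run1, rest1, h1⟩ := runsR_cons i rs'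
    by_cases hc : init.toNat + 1 = i.toNat
    · -- merged: runsR (init :: i :: rs') = (init :: i :: run1) :: rest1
      have h2 : runsR (init :: i :: rs') = (init :: i :: run1) :: rest1 := by
        simp only [runsR] at h1 ⊢
        rw [h1]
        simp [hc]
      rw [h2] at h
      injection h with hh ht
      injection hh with _ hh2
      subst ht
      have := ih i (word ++ [i]) run1 rest1 h1
      simp only [chop, if_pos hc]
      rw [this, ← hh2]
      simp
    · have h2 : runsR (init :: i :: rs') = [init] :: (i :: run1) :: rest1 := by
        simp only [runsR] at h1 ⊢
        rw [h1]
        have : ¬ i.toNat = init.toNat + 1 := by omega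
        simp [this]
      rw [h2] at h
      injection h with hh ht
      injection hh with _ hh2
      subst ht
      have := ih i [i] run1 rest1 h1
      simp only [chop, if_neg hc]
      rw [this, ← hh2]
      simp

lemma join_map_reverse (runs : List (List Char)) :
    String.join (runs.map (fun r => String.ofList r.reverse)) = String.ofList (runs.map List.reverse).flatten := by
  rw [String.join_eq]
  congr 1
  simp [List.map_map, Function.comp_def]

lemma alt_foldl_eq_runsR (l : List Char) :
    l.reverse.foldl
      (fun (runs : List (List Char)) (c : Char) =>
        match runs with
        | (d :: r) :: rest =>
          if d.toNat = c.toNat + 1 then (c :: d :: r) :: rest else [c] :: (d :: r) :: rest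
        | _ => [c] :: runs)
      [] = runsR l := by
  rw [List.foldl_reverse]
  induction l with
  | nil => rfl
  | cons c cs ih =>
    simp only [List.foldr_cons, ih]
    rfl

-- ===== VERDICT (by name: the statement is the Claim_ definition above) =====
theorem solution_spec : Claim_equal_solution := by
  intro s _ hpre
  rcases hl : s.toList with _ | ⟨c, rest⟩
  · exact absurd (by cases s; simpa using hl) hpre
  · obtain ⟨run, rs, hr⟩ := runsR_cons c rest
    have hA : solution s = String.join ([] ++ chop c [c] rest) := by
      have h := congrArg String.join (A_fold_eq_chop rest [] c [c])
      unfold solution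
      rw [hl]
      exact h
    have hB : solution_alt s = String.ofList ((runsR (c :: rest)).map List.reverse).flatten := by
      unfold solution_alt
      rw [hl, alt_foldl_eq_runsR]
    unfold Spec_solution
    rw [hA, hB, chop_eq_runsR rest c [c] run rs hr, hr]
    have := join_map_reverse ((c :: run) :: rs)
    simpa using this

@[simp] theorem solution_raises : Claim_raises_solution := by
  unfold Claim_raises_solution
  exact ⟨fun s _ hr hp => hp hr, by decide⟩
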